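-- pv_equiv track=rewrite | github.com/jonathonreilly/toy-physics | scripts/frontier_s3_cap_uniqueness.py | link_boundary_verts
-- ===== SOURCE A (Python) =====
-- from collections import defaultdict
--
-- def link_boundary_verts(dirs, edges, tris) -> set[int]:
--     """Boundary vertices of a link-disk (on edges with count=1)."""
--     ec = defaultdict(int)
--     for tri in tris:
--         for pair in [(tri[0], tri[1]), (tri[0], tri[2]), (tri[1], tri[2])]:
--             ec[pair] += 1
--     bd = set()
--     for (i, j), c in ec.items():
--         if c == 1:
--             bd.add(i)
--             bd.add(j)
--     return bd
-- ===== SOURCE B (Python) =====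
-- def link_boundary_verts(dirs, edges, tris) -> set[int]:
--     """Boundary vertices of a link-disk (on edges with count=1)."""
--     pairs = [pair for tri in tris
--              for pair in ((tri[0], tri[1]), (tri[0], tri[2]), (tri[1], tri[2]))]
--     sp = sorted(pairs)
--     dup = set()
--     for a, b in zip(sp, sp[1:]):
--         if a == b:
--             dup.add(a)
--     bd = set()
--     for (i, j) in pairs:
--         if (i, j) not in dup:
--             bd.add(i)
--             bd.add(j)
--     return bd
-- ===== Notes on version B (the rewrite author's own statement) =====
-- stated objective: alternative
-- what changed: Replaces the edge-count dict plus a post-filter over counted items by sort-then-scan: flatten the three edge pairs of every triangle into one list, sort it lexicographically, mark duplicated edges by a single adjacent-equality scan of the sorted list, then collect both endpoints of every edge not marked as duplicated.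
import Mathlib
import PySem

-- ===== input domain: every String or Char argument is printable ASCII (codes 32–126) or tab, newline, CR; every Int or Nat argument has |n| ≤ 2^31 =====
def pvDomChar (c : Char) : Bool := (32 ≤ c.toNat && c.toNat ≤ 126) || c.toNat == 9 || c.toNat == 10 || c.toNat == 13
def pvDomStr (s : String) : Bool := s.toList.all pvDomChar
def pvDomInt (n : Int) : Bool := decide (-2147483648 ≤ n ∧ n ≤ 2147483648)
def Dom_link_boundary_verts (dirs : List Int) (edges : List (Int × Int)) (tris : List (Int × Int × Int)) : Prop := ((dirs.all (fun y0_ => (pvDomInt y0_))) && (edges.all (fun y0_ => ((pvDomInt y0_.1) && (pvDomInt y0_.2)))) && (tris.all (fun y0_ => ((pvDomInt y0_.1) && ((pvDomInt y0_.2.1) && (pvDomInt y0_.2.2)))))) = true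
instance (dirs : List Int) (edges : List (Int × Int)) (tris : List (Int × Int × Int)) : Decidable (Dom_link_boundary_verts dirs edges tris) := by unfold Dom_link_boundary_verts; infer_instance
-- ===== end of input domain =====

-- B replaces A's per-edge hash counting by sort-then-scan: flatten the edge list, sort it,
-- mark duplicated edges by an adjacent-equality scan, then collect endpoints of unmarked edges.
-- Objective: alternative (different algorithm, similar cost). Return values compared as finite sets of ints.

-- ===== PORT A =====
-- the three (unnormalized) edge pairs of a triangle, in A's (and B's) order
def pvPairs (t : Int × Int × Int) : List (Int × Int) := [(t.1, t.2.1), (t.1, t.2.2), (t.2.1, t.2.2)]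

def link_boundary_verts (dirs : List Int) (edges : List (Int × Int)) (tris : List (Int × Int × Int)) : List Int :=
  -- ec = defaultdict(int); ec[pair] += 1 over the three pairs of each tri
  (tris.foldl (fun d tri => (pvPairs tri).foldl (fun d p => d.modify p 0 (· + 1)) d)
      (PySem.Dict.empty : PySem.Dict (Int × Int) Int)).items.foldl
    (fun bd kv => if kv.2 == 1 then PySem.Set.add (PySem.Set.add bd kv.1.1) kv.1.2 else bd)
    (PySem.Set.empty : PySem.Set Int)

-- ===== PORT B =====
def link_boundary_verts_alt (dirs : List Int) (edges : List (Int × Int)) (tris : List (Int × Int × Int)) : List Int :=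
  -- pairs = [pair for tri in tris for pair in (...)]
  let pairs := tris.flatMap pvPairs
  -- sp = sorted(pairs)   (Python tuple sort = lexicographic: sorted2 with the two components)
  let sp := PySem.List.sorted2 pairs (fun p => p.1) (fun p => p.2)
  -- for a, b in zip(sp, sp[1:]): if a == b: dup.add(a)
  let dup := (sp.zip (PySem.List.slice sp (some 1) none)).foldl
    (fun d ab => if ab.1 == ab.2 then PySem.Set.add d ab.1 else d)
    (PySem.Set.empty : PySem.Set (Int × Int))
  -- for (i, j) in pairs: if (i, j) not in dup: bd.add(i); bd.add(j)
  pairs.foldl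
    (fun bd p => if !(PySem.Set.contains dup p) then PySem.Set.add (PySem.Set.add bd p.1) p.2 else bd)
    (PySem.Set.empty : PySem.Set Int)

-- ===== PRECONDITION & SPEC =====
def Spec_link_boundary_verts (dirs : List Int) (edges : List (Int × Int)) (tris : List (Int × Int × Int)) (out : List Int) : Prop := out = link_boundary_verts_alt dirs edges tris
instance (dirs : List Int) (edges : List (Int × Int)) (tris : List (Int × Int × Int)) (out : List Int) : Decidable (Spec_link_boundary_verts dirs edges tris out) := by unfold Spec_link_boundary_verts; infer_instance

-- ===== CLAIM =====
def Claim_equal_link_boundary_verts : Prop := ∀ (dirs : List Int) (edges : List (Int × Int)) (tris : List (Int × Int × Int)), Dom_link_boundary_verts dirs edges tris → Spec_link_boundary_verts dirs edges tris (link_boundary_verts dirs edges tris)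

-- ===== LEMMAS AND PROOFS =====

-- the strict lexicographic 'before' relation sorted2 sorts by (for key components fst, snd)
def pvLt (a b : Int × Int) : Bool := decide (a.1 < b.1) || (!decide (b.1 < a.1) && decide (a.2 < b.2))

theorem pvLt_trans {a b c : Int × Int} (h1 : pvLt a b = true) (h2 : pvLt b c = true) : pvLt a c = true := by
  rcases a with ⟨a1, a2⟩; rcases b with ⟨b1, b2⟩; rcases c with ⟨c1, c2⟩
  simp only [pvLt, Bool.or_eq_true, Bool.and_eq_true, Bool.not_eq_true', decide_eq_true_eq,
    decide_eq_false_iff_not, not_lt] at *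
  omega

theorem pvLt_eq_of_not {a b : Int × Int} (h1 : pvLt a b = false) (h2 : pvLt b a = false) : a = b := by
  rcases a with ⟨a1, a2⟩; rcases b with ⟨b1, b2⟩
  simp only [pvLt, Bool.or_eq_false_iff, Bool.and_eq_false_iff, Bool.not_eq_false',
    decide_eq_true_eq, decide_eq_false_iff_not, not_lt] at *
  simp only [Prod.mk.injEq]
  omega

theorem pvLt_asymm {a b : Int × Int} (h : pvLt a b = true) : pvLt b a = false := by
  rcases a with ⟨a1, a2⟩; rcases b with ⟨b1, b2⟩
  simp only [pvLt, Bool.or_eq_true, Bool.and_eq_true, Bool.not_eq_true', decide_eq_true_eq,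
    decide_eq_false_iff_not, not_lt, Bool.or_eq_false_iff, Bool.and_eq_false_iff,
    Bool.not_eq_false'] at *
  omega

-- insertBy with pvLt preserves the sortedness invariant
theorem pv_pairwise_insertBy (x : Int × Int) (ys : List (Int × Int))
    (h : ys.Pairwise (fun a b => pvLt b a = false)) :
    (PySem.List.insertBy pvLt x ys).Pairwise (fun a b => pvLt b a = false) := by
  induction ys with
  | nil =>
    simp [PySem.List.insertBy]
  | cons y ys ih =>
    rw [List.pairwise_cons] at h
    obtain ⟨hy, hys⟩ := h
    show (if pvLt x y then x :: y :: ys else y :: PySem.List.insertBy pvLt x ys).Pairwise _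
    by_cases hxy : pvLt x y = true
    · rw [if_pos hxy]
      refine List.Pairwise.cons ?_ (List.Pairwise.cons hy hys)
      intro z hz
      rw [List.mem_cons] at hz
      rcases hz with rfl | hz
      · exact pvLt_asymm hxy
      · -- z ∈ ys; if pvLt z x then pvLt z y by transitivity with pvLt x y, contradicting hy
        cases hb : pvLt z x with
        | false => rfl
        | true => exact absurd (hy z hz) (by simp [pvLt_trans hb hxy])
    · rw [if_neg hxy]
      refine List.Pairwise.cons ?_ (ih hys)
      intro z hz
      rw [PySem.List.mem_insertBy] at hz
      rcases hz with rfl | hz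
      · exact Bool.eq_false_iff.mpr hxy
      · exact hy z hz
theorem pv_pairwise_foldl (xs : List (Int × Int)) (acc : List (Int × Int))
    (h : acc.Pairwise (fun a b => pvLt b a = false)) :
    (xs.foldl (fun acc x => PySem.List.insertBy pvLt x acc) acc).Pairwise
      (fun a b => pvLt b a = false) := by
  induction xs generalizing acc with
  | nil => exact h
  | cons x xs ih => exact ih _ (pv_pairwise_insertBy x acc h)

theorem pv_sorted2_pairwise (xs : List (Int × Int)) :
    (PySem.List.sorted2 xs (fun p => p.1) (fun p => p.2)).Pairwise
      (fun a b => pvLt b a = false) :=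
  pv_pairwise_foldl xs [] List.Pairwise.nil

-- membership in the adjacent-duplicate fold, first with a general accumulator
theorem pv_mem_dupfold_acc (l : List ((Int × Int) × (Int × Int))) (acc : PySem.Set (Int × Int))
    (p : Int × Int) :
    p ∈ l.foldl (fun d ab => if ab.1 == ab.2 then PySem.Set.add d ab.1 else d) acc
      ↔ p ∈ acc ∨ ∃ ab ∈ l, ab.1 = ab.2 ∧ ab.1 = p := by
  induction l generalizing acc with
  | nil => simp
  | cons ab l ih =>
    rw [List.foldl_cons]
    by_cases h : ab.1 = ab.2
    · rw [if_pos (by simp [h]), ih]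
      simp only [PySem.Set.mem_add, List.mem_cons, exists_eq_or_imp, h]
      tauto
    · rw [if_neg (by simp [h]), ih]
      simp only [List.mem_cons, exists_eq_or_imp]
      tauto
-- in a pvLt-sorted list, an adjacent equal pair at p exists iff p occurs at least twice
theorem pv_adj_iff_count (s : List (Int × Int)) (hs : s.Pairwise (fun a b => pvLt b a = false))
    (p : Int × Int) :
    (∃ ab ∈ s.zip s.tail, ab.1 = ab.2 ∧ ab.1 = p) ↔ 2 ≤ List.count p s := by
  induction s with
  | nil => simp
  | cons a t ih =>
    cases t with
    | nil =>
      constructor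
      · rintro ⟨ab, hab, _, _⟩
        simp at hab
      · intro h
        rw [List.count_cons, List.count_nil] at h
        rcases eq_or_ne p a with h' | h'
        · simp [h'] at h
        · simp [Ne.symm h'] at h
    | cons b u =>
      rw [List.pairwise_cons] at hs
      obtain ⟨ha, hbu⟩ := hs
      have ih' : (∃ ab ∈ (b :: u).zip u, ab.1 = ab.2 ∧ ab.1 = p) ↔ 2 ≤ List.count p (b :: u) :=
        ih hbu
      have hzip : (a :: b :: u).zip (a :: b :: u).tail = (a, b) :: (b :: u).zip u := rfl
      rw [hzip]
      by_cases hpa : a = p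
      · subst hpa
        by_cases hab : a = b
        · subst hab
          constructor
          · intro _
            have h1 : 1 ≤ List.count a (a :: u) := by simp
            have h2 : List.count a (a :: a :: u) = List.count a (a :: u) + 1 := by
              simp
            omega
          · intro _
            exact ⟨(a, a), by simp, rfl, rfl⟩
        · -- a ≠ b and sorted: a does not occur in b :: u
          have hnotin : a ∉ b :: u := by
            intro hmem
            rcases List.mem_cons.mp hmem with h' | h'
            · exact hab h'
            · rw [List.pairwise_cons] at hbu
              exact hab (pvLt_eq_of_not (hbu.1 a h') (ha b (by simp)))
          have hc0 : List.count a (b :: u) = 0 := List.count_eq_zero.mpr hnotin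
          have hcc : List.count a (a :: b :: u) = List.count a (b :: u) + 1 := by
            simp
          constructor
          · rintro ⟨ab, hab', h1, h2⟩
            rcases List.mem_cons.mp hab' with rfl | hab'
            · exact absurd h1 hab
            · have := ih'.mp ⟨ab, hab', h1, h2⟩
              omega
          · intro h
            rw [hcc, hc0] at h
            exact absurd h (by omega)
      · -- a ≠ p: the head pair contributes nothing
        have hca : List.count p (a :: b :: u) = List.count p (b :: u) := by
          rw [List.count_cons]
          simp [hpa]
        rw [hca]
        constructor
        · rintro ⟨ab, hab', h1, h2⟩
          rcases List.mem_cons.mp hab' with rfl | hab'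
          · exact absurd h2 hpa
          · exact ih'.mp ⟨ab, hab', h1, h2⟩
        · intro h
          obtain ⟨ab, hab', h1, h2⟩ := ih'.mpr h
          exact ⟨ab, List.mem_cons_of_mem _ hab', h1, h2⟩

-- dedup-filter: the count-1 elements of a list, in order, are the count-1 elements of its dedup
theorem pv_filter_count_one (l : List (Int × Int)) :
    List.filter (fun x => List.count x l == 1) (PySem.Set.ofList l)
      = List.filter (fun x => List.count x l == 1) l := by
  induction l using List.reverseRecOn with
  | nil => rfl
  | append_singleton l q ih =>
    have hcnt : ∀ x : Int × Int, List.count x (l ++ [q]) = List.count x l + (if x = q then 1 else 0) := by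
      intro x
      rw [List.count_append]
      by_cases hx : x = q
      · subst hx; simp
      · simp [List.count_eq_zero.mpr (by simp [hx] : x ∉ [q]), hx]
    by_cases hq : q ∈ l
    · have hofl : PySem.Set.ofList (l ++ [q]) = PySem.Set.ofList l := by
        rw [PySem.Set.ofList_append_singleton,
            PySem.Set.add_of_mem (by simp [PySem.Set.mem_ofList, hq])]
      have key : ∀ m : List (Int × Int),
          List.filter (fun x => List.count x (l ++ [q]) == 1) m
            = List.filter (fun x => !(x == q)) (List.filter (fun x => List.count x l == 1) m) := by
        intro m
        rw [List.filter_filter]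
        apply List.filter_congr
        intro x _
        by_cases hx : x = q
        · have h2 : 2 ≤ List.count x (l ++ [q]) := by
            rw [hcnt x, if_pos hx]
            have : 1 ≤ List.count x l := List.count_pos_iff.mpr (by rw [hx]; exact hq)
            omega
          have hb1 : (List.count x (l ++ [q]) == 1) = false := by
            rw [beq_eq_false_iff_ne]
            omega
          have hb2 : (x == q) = true := beq_iff_eq.mpr hx
          rw [hb1, hb2]
          simp
        · have hb2 : (x == q) = false := beq_eq_false_iff_ne.mpr hx
          rw [hcnt x, if_neg hx, hb2, Nat.add_zero]
          simp
      rw [hofl, key, key, ih, List.filter_append, List.filter_append]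
      simp
    · have hq0 : List.count q l = 0 := List.count_eq_zero.mpr hq
      have hofl : PySem.Set.ofList (l ++ [q]) = PySem.Set.ofList l ++ [q] := by
        rw [PySem.Set.ofList_append_singleton,
            PySem.Set.add_of_not_mem (by simp [PySem.Set.mem_ofList, hq])]
      have hfq : List.filter (fun x => List.count x (l ++ [q]) == 1) [q] = [q] := by
        simp [hq0]
      have key : ∀ m : List (Int × Int), (∀ x ∈ m, x ∈ l) →
          List.filter (fun x => List.count x (l ++ [q]) == 1) m
            = List.filter (fun x => List.count x l == 1) m := by
        intro m hm
        apply List.filter_congr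
        intro x hx
        have hxq : x ≠ q := fun h => hq (h ▸ hm x hx)
        rw [hcnt x, if_neg hxq, Nat.add_zero]
      rw [hofl, List.filter_append, List.filter_append, hfq,
          key (PySem.Set.ofList l) (fun x hx => by simpa [PySem.Set.mem_ofList] using hx),
          key l (fun x hx => hx), ih]

-- A's dict is Counter of the flattened pair list
theorem pvA_counter (tris : List (Int × Int × Int)) :
    tris.foldl (fun d tri => (pvPairs tri).foldl (fun d p => d.modify p 0 (· + 1)) d)
        (PySem.Dict.empty : PySem.Dict (Int × Int) Int)
      = PySem.Dict.counter (tris.flatMap pvPairs) := by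
  rw [PySem.Dict.counter_eq_foldl, List.foldl_flatMap]

-- ===== VERDICT =====
theorem link_boundary_verts_spec : Claim_equal_link_boundary_verts := by
  intro dirs edges tris _
  unfold Spec_link_boundary_verts link_boundary_verts link_boundary_verts_alt
  rw [pvA_counter, PySem.Dict.items_counter, List.foldl_map]
  simp only [PySem.List.slice_from_one]
  set pairs := tris.flatMap pvPairs with hpairs
  set sp := PySem.List.sorted2 pairs (fun p => p.1) (fun p => p.2) with hsp
  have hsort : sp.Pairwise (fun a b => pvLt b a = false) := pv_sorted2_pairwise pairs
  set dupS := (sp.zip sp.tail).foldl (fun d ab => if ab.1 == ab.2 then PySem.Set.add d ab.1 else d)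
    (PySem.Set.empty : PySem.Set (Int × Int)) with hdupS
  -- duplicate-set membership ↔ count ≥ 2 in pairs (via the permutation)
  have hdup : ∀ p : Int × Int, p ∈ dupS ↔ 2 ≤ List.count p pairs := by
    intro p
    rw [hdupS, pv_mem_dupfold_acc, pv_adj_iff_count sp hsort p,
        (PySem.List.sorted2_perm pairs (fun p => p.1) (fun p => p.2) false).count_eq]
    simp [PySem.Set.empty]
  -- both sides as folds over filtered lists
  rw [PySem.List.foldl_if_eq_foldl_filter, PySem.List.foldl_if_eq_foldl_filter]
  have hA : List.filter (fun k => ((List.count k pairs : Int) == 1)) (PySem.Set.ofList pairs)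
      = List.filter (fun x => List.count x pairs == 1) (PySem.Set.ofList pairs) := by
    apply List.filter_congr
    intro x _
    by_cases h : List.count x pairs = 1 <;> simp [h]
  have hB : List.filter (fun p => !(PySem.Set.contains dupS p)) pairs
      = List.filter (fun x => List.count x pairs == 1) pairs := by
    apply List.filter_congr
    intro x hx
    have h1 : 1 ≤ List.count x pairs := List.count_pos_iff.mpr hx
    by_cases h : 2 ≤ List.count x pairs
    · have hct : PySem.Set.contains dupS x = true := (PySem.Set.contains_iff _ _).mpr ((hdup x).mpr h)
      rw [hct]
      simp only [Bool.not_true]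
      rw [eq_comm, beq_eq_false_iff_ne]
      omega
    · have hc1 : List.count x pairs = 1 := by omega
      have hcf : PySem.Set.contains dupS x = false := by
        rw [Bool.eq_false_iff]
        intro hc
        exact absurd ((hdup x).mp ((PySem.Set.contains_iff _ _).mp hc)) h
      rw [hcf]
      simp [hc1]
  rw [hA, hB, pv_filter_count_one]
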